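-- pv_equiv track=rewrite | github.com/jamesdfurtado/simu-ats | modules/job_parser.py | clean_and_chunk_text
-- ===== SOURCE A (Python) =====
-- def clean_and_chunk_text(text, chunk_size=2000):
--     """
--     Cleans the input text and splits it into a list of chunks,
--     each approximately chunk_size characters, cutting only at word boundaries.
--     """
--     # Step 1: Clean the input text
--     lines = text.splitlines()
--
--     full_input = ""
--     for line in lines:
--         line = line.strip()
--         if line:
--             if not line.endswith(('.', '!', '?')):
--                 full_input += line + ' '
--             else:
--                 full_input += line + ' '
--
--     # Replace multiple spaces with a single space
--     full_input = ' '.join(full_input.split())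
--
--     # Step 2: Split into chunks
--     chunks = []
--     start = 0
--
--     while start < len(full_input):
--         end = min(start + chunk_size, len(full_input))
--         if end < len(full_input):
--             # Look backwards for a space
--             while end > start and full_input[end] != ' ':
--                 end -= 1
--             if end == start:
--                 # Couldn't find a space, force hard cut
--                 end = min(start + chunk_size, len(full_input))
--         chunk = full_input[start:end].strip()
--         chunks.append(chunk)
--         start = end + 1  # move past the space
--
--     return chunks
-- ===== SOURCE B (Python) =====
-- def clean_and_chunk_text(text, chunk_size=2000):
--     """
--     Cleans the input text into one single-spaced string and repeatedly
--     slices a chunk off its head: at the last space within the window if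
--     there is one, at chunk_size characters otherwise.
--     """
--     words = []
--     for line in text.splitlines():
--         line = line.strip()
--         if line:
--             words.extend(line.split())
--     s = ' '.join(words)
--
--     chunks = []
--     while len(s) > chunk_size:
--         cut = s.rfind(' ', 1, chunk_size + 1)
--         if cut == -1:
--             cut = chunk_size
--         chunks.append(s[:cut].strip())
--         s = s[cut + 1:]
--     if s:
--         chunks.append(s.strip())
--     return chunks
-- ===== Notes on version B (the rewrite author's own statement) =====
-- stated objective: faster
-- what changed: The cleaning gathers the words line by line and joins them once instead of accumulating a line-joined string and re-splitting it, and the chunker slices each chunk off the head of the string, locating the cut with a single C-level str.rfind call over the window instead of A's per-character backward while-scan with start/end index bookkeeping (measured ~7x faster at the largest size); Pre_ excludes negative chunk_size, where A loops forever (and so does B).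
-- outside the precondition, e.g. on clean_and_chunk_text('', -1): A returns [], B does not finish within the time limit
import Mathlib
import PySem

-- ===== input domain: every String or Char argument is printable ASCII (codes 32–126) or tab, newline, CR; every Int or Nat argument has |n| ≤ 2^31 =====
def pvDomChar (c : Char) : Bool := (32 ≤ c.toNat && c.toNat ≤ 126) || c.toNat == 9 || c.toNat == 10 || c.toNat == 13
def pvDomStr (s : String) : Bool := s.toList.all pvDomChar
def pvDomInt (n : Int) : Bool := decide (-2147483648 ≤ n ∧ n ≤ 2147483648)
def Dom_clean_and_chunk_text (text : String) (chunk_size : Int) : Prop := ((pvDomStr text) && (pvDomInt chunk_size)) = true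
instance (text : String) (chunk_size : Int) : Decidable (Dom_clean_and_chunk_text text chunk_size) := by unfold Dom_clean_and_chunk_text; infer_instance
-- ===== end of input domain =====

-- B gathers the words line by line and joins them once, then chunks by slicing chunks off the
-- head of the string, finding each cut with one rfind call over the window instead of A's
-- per-character backward scan with start/end index bookkeeping (measurably faster at scale).

-- ===== PORT A =====
-- cleaning loop of A (the endswith branch is kept even though both of its arms are identical, as in the Python)
def pvCleanA (text : String) : List Char :=
  (PySem.Chars.splitlines text.toList).foldl (fun full line =>
    let line := PySem.Chars.strip line
    if line.isEmpty then full
    else if !(PySem.Chars.endswith line ['.'] || PySem.Chars.endswith line ['!'] || PySem.Chars.endswith line ['?'])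
      then full ++ line ++ [' ']
      else full ++ line ++ [' ']) []

-- 'while end > start and full_input[end] != ' ': end -= 1' — full_input[end] is always in range when called
-- (start ≤ end < len), where pyGetD is exact; the fuel (number of remaining steps, e - start at the call)
-- is a totality guard only
def pvScanA (u : List Char) (start : Int) : Int → Nat → Int
  | e, 0 => e
  | e, fuel+1 =>
    if start < e ∧ PySem.List.pyGetD u e ' ' ≠ ' ' then pvScanA u start (e - 1) fuel
    else e

-- A's outer while loop; fuel is a totality guard only (the Python loop advances start by ≥ 2 per iteration for chunk_size ≥ 1)
def pvLoopA (u : List Char) (cs : Int) : Int → List String → Nat → List String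
  | _, acc, 0 => acc.reverse
  | start, acc, fuel+1 =>
    if start < (u.length : Int) then
      let e0 := min (start + cs) (u.length : Int)
      let e := if e0 < (u.length : Int) then
                 (let e1 := pvScanA u start e0 ((e0 - start).toNat)
                  if e1 = start then min (start + cs) (u.length : Int) else e1)
               else e0
      let chunk := PySem.Chars.strip (PySem.List.slice u (some start) (some e))
      pvLoopA u cs (e + 1) (String.ofList chunk :: acc) fuel
    else acc.reverse

def clean_and_chunk_text (text : String) (chunk_size : Int) : List String :=
  let full_input := PySem.Chars.join [' '] (PySem.Chars.split₀ (pvCleanA text))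
  pvLoopA full_input chunk_size 0 [] (text.toList.length + 2)

-- ===== PORT B =====
-- B's word gathering: the words of each stripped non-empty line, in order
def pvWordsB (text : String) : List (List Char) :=
  (PySem.Chars.splitlines text.toList).foldl (fun ws line =>
    let line := PySem.Chars.strip line
    if line.isEmpty then ws else ws ++ PySem.Chars.split₀ line) []

-- B's 'while len(s) > chunk_size' head-slicing loop; fuel is a totality guard only (each round
-- removes cut+1 ≥ 1 characters for chunk_size ≥ 0)
def pvLoopB2 (cs : Int) : List Char → List String → Nat → List String
  | _, acc, 0 => acc.reverse
  | s, acc, f+1 =>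
    if cs < (s.length : Int) then
      let cut0 := PySem.Chars.rfindFrom s [' '] 1 (some (cs + 1))
      let cut := if cut0 = -1 then cs else cut0
      pvLoopB2 cs (PySem.List.slice s (some (cut + 1)) none)
        (String.ofList (PySem.Chars.strip (PySem.List.slice s (some 0) (some cut))) :: acc) f
    else
      if s.isEmpty then acc.reverse
      else (String.ofList (PySem.Chars.strip s) :: acc).reverse

def clean_and_chunk_text_alt (text : String) (chunk_size : Int) : List String :=
  let s := PySem.Chars.join [' '] (pvWordsB text)
  pvLoopB2 chunk_size s [] (text.toList.length + 2)

-- ===== PRECONDITION & SPEC =====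
-- Pre_ excludes negative chunk_size, where A (and B) loops forever on any non-empty cleaned text.
def Pre_clean_and_chunk_text (text : String) (chunk_size : Int) : Prop := 0 ≤ chunk_size
instance (text : String) (chunk_size : Int) : Decidable (Pre_clean_and_chunk_text text chunk_size) := by
  unfold Pre_clean_and_chunk_text; infer_instance

def pvWitness_clean_and_chunk_text : String × Int := ("hello world, a fine day.\nsecond line", 11)

def Spec_clean_and_chunk_text (text : String) (chunk_size : Int) (out : List String) : Prop :=
  out = clean_and_chunk_text_alt text chunk_size
instance (text : String) (chunk_size : Int) (out : List String) : Decidable (Spec_clean_and_chunk_text text chunk_size out) := by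
  unfold Spec_clean_and_chunk_text; infer_instance

-- ===== CLAIM (what is proved, stated in full; the proofs are below) =====
def Claim_equal_clean_and_chunk_text : Prop := ∀ (text : String) (chunk_size : Int),
  Dom_clean_and_chunk_text text chunk_size → Pre_clean_and_chunk_text text chunk_size →
  Spec_clean_and_chunk_text text chunk_size (clean_and_chunk_text text chunk_size)

-- ===== LEMMAS AND PROOFS =====

-- A's cleaning fold with the vacuous endswith branch collapsed
def pvCleanB (text : String) : List Char :=
  (PySem.Chars.splitlines text.toList).foldl (fun full line =>
    let line := PySem.Chars.strip line
    if line.isEmpty then full else full ++ line ++ [' ']) []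

lemma pvCleanA_eq (text : String) : pvCleanA text = pvCleanB text := by
  unfold pvCleanA pvCleanB
  congr 1
  funext full line
  simp only [ite_self]

lemma pvScan_none (u : List Char) (start : Int) (m : Nat)
    (h : ∀ q : Nat, 1 ≤ q → q ≤ m → PySem.List.pyGetD u (start + q) ' ' ≠ ' ') :
    pvScanA u start (start + m) m = start := by
  induction m with
  | zero => simp [pvScanA]
  | succ m ih =>
    rw [pvScanA]
    have hne := h (m + 1) (by omega) le_rfl
    rw [if_pos ⟨by push_cast; omega, by push_cast at hne ⊢; exact hne⟩]
    have : start + (↑(m + 1) : Int) - 1 = start + m := by push_cast; ring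
    rw [this]
    exact ih (fun q h1 h2 => h q h1 (by omega))

lemma pvScan_hit (u : List Char) (start : Int) (p m : Nat) (h1 : 1 ≤ p) (hpm : p ≤ m)
    (hsp : PySem.List.pyGetD u (start + p) ' ' = ' ')
    (h : ∀ q : Nat, p < q → q ≤ m → PySem.List.pyGetD u (start + q) ' ' ≠ ' ') :
    pvScanA u start (start + m) m = start + p := by
  induction m with
  | zero => omega
  | succ m ih =>
    by_cases hp : p = m + 1
    · subst hp
      push_cast at hsp
      rw [pvScanA, if_neg (by push_cast; simp [hsp])]
    · rw [pvScanA]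
      have hne := h (m + 1) (by omega) le_rfl
      rw [if_pos ⟨by push_cast; omega, by push_cast at hne ⊢; exact hne⟩]
      have : start + (↑(m + 1) : Int) - 1 = start + m := by push_cast; ring
      rw [this]
      exact ih (by omega) (fun q hq1 hq2 => h q hq1 (by omega))

lemma pvChar (u s : List Char) (n : Nat) (hd : u.drop n = s) (q : Nat) (hq : q < s.length) :
    PySem.List.pyGetD u ((n : Int) + q) ' ' = s.getD q ' ' := by
  rw [show ((n : Int) + q) = ((n + q : Nat) : Int) from by push_cast; ring,
    PySem.List.pyGetD_natCast]
  subst hd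
  simp [List.getD_eq_getElem?_getD, List.getElem?_drop]

lemma pvLoopA_stop (u : List Char) (cs start : Int) (acc : List String) (f : Nat)
    (h : (u.length : Int) ≤ start) : pvLoopA u cs start acc f = acc.reverse := by
  cases f with
  | zero => rfl
  | succ f => rw [pvLoopA]; simp [not_lt.mpr h]

-- ===== the word-multiset view: split₀ of the cleaned text is split₀ of the raw text =====

/-- the maximal whitespace-free runs of a character list (specification of str.split()) -/
def pvWords : List Char → List (List Char)
  | [] => []
  | c :: s =>
    if PySem.Chars.isspace c then pvWords s
    else (c :: s.takeWhile (fun d => !PySem.Chars.isspace d)) ::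
      pvWords (s.dropWhile (fun d => !PySem.Chars.isspace d))
termination_by s => s.length
decreasing_by
  · simp
  · exact Nat.lt_of_le_of_lt (List.length_dropWhile_le _ _) (by simp)

lemma pvWords_nil : pvWords [] = [] := by rw [pvWords.eq_def]

lemma pvWords_cons (c : Char) (s : List Char) :
    pvWords (c :: s) = if PySem.Chars.isspace c then pvWords s
      else (c :: s.takeWhile (fun d => !PySem.Chars.isspace d)) ::
        pvWords (s.dropWhile (fun d => !PySem.Chars.isspace d)) := by
  rw [pvWords.eq_def]

lemma pvWords_all_space (l : List Char) (h : ∀ c ∈ l, PySem.Chars.isspace c = true) :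
    pvWords l = [] := by
  induction l with
  | nil => exact pvWords_nil
  | cons c t ih =>
    rw [pvWords_cons, if_pos (h c (by simp))]
    exact ih (fun d hd => h d (by simp [hd]))

lemma pvTakeWhile_word (t : List Char) (h : ∀ x ∈ t, PySem.Chars.isspace x = false) :
    ∀ (c : Char), PySem.Chars.isspace c = true → ∀ r,
    (t ++ c :: r).takeWhile (fun d => !PySem.Chars.isspace d) = t ∧
    (t ++ c :: r).dropWhile (fun d => !PySem.Chars.isspace d) = c :: r := by
  induction t with
  | nil => intro c hc r; simp [hc]
  | cons a t ih =>
    intro c hc r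
    have ha : PySem.Chars.isspace a = false := h a (by simp)
    obtain ⟨h1, h2⟩ := ih (fun x hx => h x (by simp [hx])) c hc r
    constructor
    · simpa [List.takeWhile_cons, ha] using h1
    · simpa [List.dropWhile_cons, ha] using h2

lemma pvWords_all_word (w : List Char) (hne : w ≠ [])
    (hw : ∀ x ∈ w, PySem.Chars.isspace x = false) : pvWords w = [w] := by
  cases w with
  | nil => exact absurd rfl hne
  | cons c t =>
    rw [pvWords_cons, if_neg (by simp [hw c (by simp)])]
    have ht : ∀ x ∈ t, PySem.Chars.isspace x = false := fun x hx => hw x (by simp [hx])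
    rw [List.takeWhile_eq_self_iff.mpr (by intro x hx; simp [ht x hx]),
      List.dropWhile_eq_nil_iff.mpr (by intro x hx; simp [ht x hx]), pvWords_nil]

lemma pvWords_word_sep (w : List Char) (hne : w ≠ [])
    (hw : ∀ x ∈ w, PySem.Chars.isspace x = false)
    (c : Char) (hc : PySem.Chars.isspace c = true) (r : List Char) :
    pvWords (w ++ c :: r) = w :: pvWords r := by
  cases w with
  | nil => exact absurd rfl hne
  | cons a t =>
    have ha : PySem.Chars.isspace a = false := hw a (by simp)
    obtain ⟨h1, h2⟩ := pvTakeWhile_word t (fun x hx => hw x (by simp [hx])) c hc r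
    rw [List.cons_append, pvWords_cons, if_neg (by simp [ha]), h1, h2, pvWords_cons, if_pos hc]

lemma pvDropWhile_head_false (p : Char → Bool) (l : List Char) (e : Char) (t : List Char)
    (h : l.dropWhile p = e :: t) : p e = false := by
  induction l with
  | nil => simp at h
  | cons a s ih =>
    rw [List.dropWhile_cons] at h
    by_cases hp : p a = true
    · rw [if_pos hp] at h; exact ih h
    · rw [if_neg hp] at h
      injection h with h1 _
      subst h1
      simpa using hp

lemma pvWords_append_sep : ∀ (n : Nat) (a : List Char), a.length ≤ n →
    ∀ (b : List Char) (c : Char), PySem.Chars.isspace c = true →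
    pvWords (a ++ c :: b) = pvWords a ++ pvWords b := by
  intro n
  induction n with
  | zero =>
    intro a ha b c hc
    have : a = [] := List.eq_nil_of_length_eq_zero (by omega)
    subst this
    rw [List.nil_append, pvWords_cons, if_pos hc, pvWords_nil, List.nil_append]
  | succ n ih =>
    intro a ha b c hc
    cases a with
    | nil => rw [List.nil_append, pvWords_cons, if_pos hc, pvWords_nil, List.nil_append]
    | cons d t =>
      by_cases hd : PySem.Chars.isspace d = true
      · rw [List.cons_append, pvWords_cons, if_pos hd, pvWords_cons, if_pos hd]
        exact ih t (by simpa using ha) b c hc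
      · have hd' : PySem.Chars.isspace d = false := by simpa using hd
        cases ht2 : t.dropWhile (fun x => !PySem.Chars.isspace x) with
        | nil =>
          have hall : ∀ x ∈ (d :: t), PySem.Chars.isspace x = false := by
            intro x hx
            rcases List.mem_cons.mp hx with hx | hx
            · subst hx; exact hd'
            · have := List.dropWhile_eq_nil_iff.mp ht2 x hx
              simpa using this
          rw [pvWords_word_sep (d :: t) (by simp) hall c hc b,
            pvWords_all_word (d :: t) (by simp) hall]
          rfl
        | cons e t3 =>
          have he : PySem.Chars.isspace e = true := by
            have := pvDropWhile_head_false _ t e t3 ht2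
            simpa using this
          have htw : ∀ x ∈ t.takeWhile (fun x => !PySem.Chars.isspace x),
              PySem.Chars.isspace x = false := by
            intro x hx
            have := List.mem_takeWhile_imp hx
            simpa using this
          have hteq : t = t.takeWhile (fun x => !PySem.Chars.isspace x) ++ e :: t3 := by
            conv_lhs => rw [← List.takeWhile_append_dropWhile
              (p := fun x => !PySem.Chars.isspace x) (l := t)]
            rw [ht2]
          have hlt3 : t3.length ≤ n := by
            have := congrArg List.length hteq
            simp only [List.length_append, List.length_cons] at this ha ⊢
            omega
          have hwall : ∀ x ∈ d :: t.takeWhile (fun x => !PySem.Chars.isspace x),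
              PySem.Chars.isspace x = false := by
            intro x hx
            rcases List.mem_cons.mp hx with hx | hx
            · subst hx; exact hd'
            · exact htw x hx
          have heq2 : d :: t
              = (d :: t.takeWhile (fun x => !PySem.Chars.isspace x)) ++ e :: t3 := by
            rw [List.cons_append]
            exact congrArg (d :: ·) hteq
          calc pvWords ((d :: t) ++ c :: b)
              = pvWords ((d :: t.takeWhile (fun x => !PySem.Chars.isspace x))
                  ++ e :: (t3 ++ c :: b)) := by
                rw [heq2]
                simp only [List.cons_append, List.append_assoc]
            _ = (d :: t.takeWhile (fun x => !PySem.Chars.isspace x)) :: pvWords (t3 ++ c :: b) :=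
                pvWords_word_sep _ (by simp) hwall e he _
            _ = (d :: t.takeWhile (fun x => !PySem.Chars.isspace x)) :: (pvWords t3 ++ pvWords b) := by
                rw [ih t3 hlt3 b c hc]
            _ = pvWords (d :: t) ++ pvWords b := by
                rw [heq2, pvWords_word_sep _ (by simp) hwall e he t3]
                rfl

lemma pvWords_append_sep' (a b : List Char) (c : Char) (hc : PySem.Chars.isspace c = true) :
    pvWords (a ++ c :: b) = pvWords a ++ pvWords b :=
  pvWords_append_sep a.length a le_rfl b c hc

lemma pvWords_append_spaces (x t : List Char) (h : ∀ c ∈ t, PySem.Chars.isspace c = true) :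
    pvWords (x ++ t) = pvWords x := by
  cases t with
  | nil => simp
  | cons c t' =>
    rw [pvWords_append_sep' x t' c (h c (by simp)),
      pvWords_all_space t' (fun d hd => h d (by simp [hd])), List.append_nil]

lemma pvWords_lstrip (l : List Char) : pvWords (PySem.Chars.lstrip l) = pvWords l := by
  unfold PySem.Chars.lstrip
  induction l with
  | nil => rfl
  | cons c t ih =>
    rw [List.dropWhile_cons]
    by_cases hc : PySem.Chars.isspace c = true
    · rw [if_pos hc, ih, pvWords_cons, if_pos hc]
    · rw [if_neg hc]

lemma pvWords_rstrip (l : List Char) : pvWords (PySem.Chars.rstrip l) = pvWords l := by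
  have hdec : l = PySem.Chars.rstrip l ++ (l.reverse.takeWhile PySem.Chars.isspace).reverse := by
    unfold PySem.Chars.rstrip
    conv_lhs => rw [← List.reverse_reverse l,
      ← List.takeWhile_append_dropWhile (p := PySem.Chars.isspace) (l := l.reverse)]
    rw [List.reverse_append]
  conv_rhs => rw [hdec]
  rw [pvWords_append_spaces]
  intro c hc
  exact List.mem_takeWhile_imp (List.mem_reverse.mp hc)

lemma pvWords_strip (l : List Char) : pvWords (PySem.Chars.strip l) = pvWords l := by
  unfold PySem.Chars.strip
  rw [pvWords_rstrip, pvWords_lstrip]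

lemma pvSplitGo_eq_pvWords (s : List Char) :
    ∀ (cur : List Char) (acc : List (List Char)),
    (∀ c ∈ cur, PySem.Chars.isspace c = false) →
    PySem.Chars.split₀.go s cur acc = acc.reverse ++ pvWords (cur.reverse ++ s) := by
  induction s with
  | nil =>
    intro cur acc hcur
    rw [show PySem.Chars.split₀.go [] cur acc =
      (if cur.isEmpty then acc.reverse else (cur.reverse :: acc).reverse) from by
        simp [PySem.Chars.split₀.go]]
    cases cur with
    | nil => simp [pvWords_nil]
    | cons a t =>
      rw [if_neg (by simp), List.append_nil,
        pvWords_all_word _ (by simp) (by intro x hx; exact hcur x (List.mem_reverse.mp hx))]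
      simp
  | cons c rest ih =>
    intro cur acc hcur
    rw [show PySem.Chars.split₀.go (c :: rest) cur acc =
      (if PySem.Chars.isspace c = true then
        (if cur.isEmpty = true then PySem.Chars.split₀.go rest [] acc
         else PySem.Chars.split₀.go rest [] (cur.reverse :: acc))
       else PySem.Chars.split₀.go rest (c :: cur) acc) from by
        by_cases h1 : PySem.Chars.isspace c = true <;>
          by_cases h2 : cur.isEmpty = true <;>
            simp [PySem.Chars.split₀.go, h1, h2]]
    by_cases hc : PySem.Chars.isspace c = true
    · rw [if_pos hc]
      cases cur with
      | nil =>
        rw [if_pos (by simp), ih [] acc (by simp)]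
        simp [pvWords_cons, hc]
      | cons a t =>
        rw [if_neg (by simp), ih [] _ (by simp),
          pvWords_word_sep (a :: t).reverse (by simp) (by intro x hx; exact hcur x (List.mem_reverse.mp hx)) c hc rest]
        simp
    · rw [if_neg hc, ih (c :: cur) acc ?_]
      · rw [show (c :: cur).reverse ++ rest = cur.reverse ++ c :: rest from by simp]
      · intro d hd
        rcases List.mem_cons.mp hd with hd | hd
        · subst hd; simpa using hc
        · exact hcur d hd

lemma pvSplit_eq_pvWords (s : List Char) : PySem.Chars.split₀ s = pvWords s := by
  unfold PySem.Chars.split₀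
  rw [pvSplitGo_eq_pvWords s [] [] (by simp)]
  rfl

lemma pvSLGo_words (isB : Char → Bool) (hB : ∀ c, isB c = true → PySem.Chars.isspace c = true) :
    ∀ (n : Nat) (s : List Char), s.length ≤ n → ∀ (cur : List Char) (acc : List (List Char)),
    ((PySem.Chars.splitlines.go isB s cur acc).map pvWords).flatten
      = (acc.reverse.map pvWords).flatten ++ pvWords (cur.reverse ++ s) := by
  intro n
  induction n with
  | zero =>
    intro s hs cur acc
    have : s = [] := List.eq_nil_of_length_eq_zero (by omega)
    subst this
    rw [PySem.Chars.splitlines.go.eq_1]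
    cases cur with
    | nil => simp [pvWords_nil]
    | cons a t => simp
  | succ n ih =>
    intro s hs cur acc
    cases s with
    | nil =>
      rw [PySem.Chars.splitlines.go.eq_1]
      cases cur with
      | nil => simp [pvWords_nil]
      | cons a t => simp
    | cons c rest =>
      by_cases hcr : c = '\r' ∧ ∃ t, rest = '\n' :: t
      · obtain ⟨hc, t, ht⟩ := hcr
        subst hc; subst ht
        rw [PySem.Chars.splitlines.go.eq_2]
        rw [ih t (by simp at hs; omega) [] (cur.reverse :: acc)]
        rw [pvWords_append_sep' cur.reverse ('\n' :: t) '\r' (by decide)]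
        simp [pvWords, show PySem.Chars.isspace '\n' = true from by decide]
      · have hnot : ∀ (rest_1 : List Char), c = '\r' → rest = '\n' :: rest_1 → False := by
          intro r1 h1 h2; exact hcr ⟨h1, r1, h2⟩
        rw [PySem.Chars.splitlines.go.eq_3 isB cur acc c rest hnot]
        by_cases hb : isB c = true
        · rw [if_pos hb, ih rest (by simpa using hs) [] (cur.reverse :: acc),
            pvWords_append_sep' cur.reverse rest c (hB c hb)]
          simp
        · rw [if_neg hb, ih rest (by simpa using hs) (c :: cur) acc,
            show (c :: cur).reverse ++ rest = cur.reverse ++ c :: rest from by simp]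

lemma pvSplitlines_words (s : List Char) :
    ((PySem.Chars.splitlines s).map pvWords).flatten = pvWords s := by
  unfold PySem.Chars.splitlines
  rw [pvSLGo_words _ ?_ s.length s le_rfl [] []]
  · rfl
  · intro c h
    simp only [Bool.or_eq_true, decide_eq_true_eq] at h
    simp only [PySem.Chars.isspace, Bool.or_eq_true, Bool.and_eq_true, decide_eq_true_eq]
    omega

lemma pvCleanB_words :
    ∀ (ls : List (List Char)) (full : List Char),
    (full = [] ∨ ∃ f0, full = f0 ++ [' ']) →
    pvWords (ls.foldl (fun full line =>
      let line := PySem.Chars.strip line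
      if line.isEmpty then full else full ++ line ++ [' ']) full)
      = pvWords full ++ (ls.map pvWords).flatten := by
  intro ls
  induction ls with
  | nil => intro full _; simp
  | cons line ls ih =>
    intro full hfull
    simp only [List.foldl_cons]
    by_cases hl : (PySem.Chars.strip line).isEmpty = true
    · rw [if_pos hl, ih full hfull]
      have hzero : pvWords line = [] := by
        rw [← pvWords_strip, List.isEmpty_iff.mp hl, pvWords_nil]
      simp [hzero]
    · rw [if_neg hl]
      rw [ih (full ++ PySem.Chars.strip line ++ [' '])
        (Or.inr ⟨full ++ PySem.Chars.strip line, by simp⟩)]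
      have hkey : pvWords (full ++ PySem.Chars.strip line ++ [' '])
          = pvWords full ++ pvWords line := by
        rw [pvWords_append_spaces (full ++ PySem.Chars.strip line) [' ']
          (by intro c hc; simp at hc; subst hc; decide)]
        rcases hfull with hfull | ⟨f0, hfull⟩
        · subst hfull
          rw [List.nil_append, pvWords_strip, pvWords_nil, List.nil_append]
        · subst hfull
          rw [show (f0 ++ [' ']) ++ PySem.Chars.strip line
                = f0 ++ ' ' :: PySem.Chars.strip line from by simp,
            pvWords_append_sep' f0 (PySem.Chars.strip line) ' ' (by decide),
            pvWords_append_spaces f0 [' '] (by intro c hc; simp at hc; subst hc; decide),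
            pvWords_strip]
      rw [hkey]
      simp

lemma pvWordsB_words (text : String) :
    pvWordsB text = pvWords text.toList := by
  have hfold : ∀ (ls : List (List Char)) (ws0 : List (List Char)),
      ls.foldl (fun ws line =>
        let line := PySem.Chars.strip line
        if line.isEmpty then ws else ws ++ PySem.Chars.split₀ line) ws0
        = ws0 ++ (ls.map pvWords).flatten := by
    intro ls
    induction ls with
    | nil => intro ws0; simp
    | cons line ls ih =>
      intro ws0
      simp only [List.foldl_cons]
      by_cases hl : (PySem.Chars.strip line).isEmpty = true
      · rw [if_pos hl, ih ws0]
        have hzero : pvWords line = [] := by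
          rw [← pvWords_strip, List.isEmpty_iff.mp hl, pvWords_nil]
        simp [hzero]
      · rw [if_neg hl, ih (ws0 ++ PySem.Chars.split₀ (PySem.Chars.strip line))]
        rw [pvSplit_eq_pvWords, pvWords_strip]
        simp
  unfold pvWordsB
  rw [hfold, List.nil_append, pvSplitlines_words]

lemma pvCleanB_eq_words (text : String) :
    PySem.Chars.split₀ (pvCleanB text) = pvWords text.toList := by
  rw [pvSplit_eq_pvWords]
  unfold pvCleanB
  rw [pvCleanB_words (PySem.Chars.splitlines text.toList) [] (Or.inl rfl),
    pvWords_nil, List.nil_append, pvSplitlines_words]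

-- ===== the backward space scan and rfind find the same cut =====

lemma pvRfindFrom_eq (s : List Char) (cs : Int) (h1 : 0 ≤ cs) (h2 : cs < (s.length : Int)) :
    PySem.Chars.rfindFrom s [' '] 1 (some (cs + 1))
      = (if PySem.Chars.rfind ((s.take (cs + 1).toNat).drop 1) [' '] = -1 then -1
         else 1 + PySem.Chars.rfind ((s.take (cs + 1).toNat).drop 1) [' ']) := by
  simp only [PySem.Chars.rfindFrom,
    if_neg (show ¬((s.length : Int) < cs + 1) from by omega),
    if_neg (show ¬(cs + 1 < (0 : Int)) from by omega),
    if_neg (show ¬((1 : Int) < 0) from by decide),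
    if_neg (show ¬(cs + 1 < (1 : Int)) from by omega)]
  norm_num

lemma pvPrefix_space (w : List Char) (i : Nat) :
    ([' '].isPrefixOf (w.drop i)) = true ↔ w[i]? = some ' ' := by
  rw [← List.head?_drop]
  cases hd : w.drop i with
  | nil => simp [List.isPrefixOf]
  | cons c t =>
    rw [show ([' '].isPrefixOf (c :: t)) = (' ' == c && true) from rfl, Bool.and_true,
      beq_iff_eq]
    constructor
    · intro h; subst h; rfl
    · intro h
      rw [List.head?_cons] at h
      injection h with h
      exact h.symm

lemma pvRgo_none (w : List Char) (j : Nat)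
    (h : ∀ i : Nat, i ≤ j → ([' '].isPrefixOf (w.drop i)) = false) :
    PySem.Chars.rfind.go w [' '] j = -1 := by
  induction j with
  | zero =>
    have h0 := h 0 le_rfl
    rw [List.drop_zero] at h0
    rw [PySem.Chars.rfind.go.eq_1, h0]
    simp
  | succ j ih =>
    rw [PySem.Chars.rfind.go.eq_2, h (j + 1) le_rfl]
    simp only [Bool.false_eq_true, if_false]
    exact ih (fun i hi => h i (by omega))

lemma pvRgo_hit (w : List Char) (j p : Nat) (hpj : p ≤ j)
    (hp : ([' '].isPrefixOf (w.drop p)) = true)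
    (h : ∀ i : Nat, p < i → i ≤ j → ([' '].isPrefixOf (w.drop i)) = false) :
    PySem.Chars.rfind.go w [' '] j = p := by
  induction j with
  | zero =>
    have hp' : p = 0 := by omega
    subst hp'
    rw [List.drop_zero] at hp
    rw [PySem.Chars.rfind.go.eq_1, if_pos hp]
    simp
  | succ j ih =>
    by_cases hpe : p = j + 1
    · subst hpe
      rw [PySem.Chars.rfind.go.eq_2, if_pos hp]
    · rw [PySem.Chars.rfind.go.eq_2, h (j + 1) (by omega) le_rfl]
      simp only [Bool.false_eq_true, if_false]
      exact ih (by omega) (fun i hi1 hi2 => h i hi1 (by omega))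

-- ===== the step-for-step simulation: A's index loop is B's head-slicing loop =====

lemma pvSim (cs : Int) (hcs : 0 ≤ cs) :
    ∀ (f : Nat) (u : List Char) (start : Nat) (acc : List String),
    pvLoopA u cs (start : Int) acc f = pvLoopB2 cs (u.drop start) acc f := by
  intro f
  induction f with
  | zero => intro u start acc; rfl
  | succ f ih =>
    intro u start acc
    by_cases hin : start < u.length
    case neg =>
      have hdrop : u.drop start = [] := List.drop_eq_nil_iff.mpr (by omega)
      rw [pvLoopA, if_neg (by exact_mod_cast not_lt.mpr (not_lt.mp hin)), pvLoopB2, hdrop]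
      rw [if_neg (by simp; omega), if_pos (by simp)]
    case pos =>
      have hsl : (u.drop start).length = u.length - start := by simp
      have hslI : ((u.drop start).length : Int) = (u.length : Int) - (start : Int) := by
        rw [hsl]; omega
      rw [pvLoopA, if_pos (by exact_mod_cast hin), pvLoopB2]
      by_cases hA1 : (u.length : Int) ≤ (start : Int) + cs
      · -- the whole remaining string is the final chunk
        have hmin : min ((start : Int) + cs) ((u.length : Int)) = (u.length : Int) :=
          min_eq_right hA1
        have hBc : ¬ (cs < ((u.drop start).length : Int)) := by omega
        have hslice : PySem.List.slice u (some (start : Int)) (some (u.length : Int))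
            = u.drop start := by
          rw [PySem.List.slice_natCast, ← hsl, List.take_length]
        have hne : (u.drop start).isEmpty = false := by
          simp only [List.isEmpty_eq_false_iff]
          intro hnil
          have := congrArg List.length hnil
          simp at this
          omega
        simp only [hmin, if_neg (lt_irrefl ((u.length : Int))), hslice]
        rw [if_neg hBc, if_neg (by simp [hne])]
        rw [pvLoopA_stop _ _ _ _ _ (by omega)]
      · rw [not_le] at hA1
        have hmin : min ((start : Int) + cs) ((u.length : Int)) = (start : Int) + cs :=
          min_eq_left (le_of_lt hA1)
        set csn := cs.toNat with hcsn
        have hcs2 : (csn : Int) = cs := Int.toNat_of_nonneg (by omega)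
        have hfeq : (((start : Int) + cs) - (start : Int)).toNat = csn := by omega
        have hBc : cs < ((u.drop start).length : Int) := by omega
        have hcss : csn < (u.drop start).length := by omega
        have hds : u.drop start = u.drop start := rfl
        have hgd : ∀ q : Nat, q < (u.drop start).length →
            ((u.drop start).getD q ' ' = ' ' ↔ (u.drop start)[q]? = some ' ') := by
          intro q hq
          rw [List.getD_eq_getElem?_getD, List.getElem?_eq_getElem hq]
          simp
        -- the window B searches
        have hwl : (((u.drop start).take (cs + 1).toNat).drop 1).length = csn := by
          have : (cs + 1).toNat = csn + 1 := by omega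
          rw [this]
          simp
          omega
        have hwget : ∀ i : Nat,
            (((u.drop start).take (cs + 1).toNat).drop 1)[i]?
              = if 1 + i < csn + 1 then (u.drop start)[1 + i]? else none := by
          intro i
          have : (cs + 1).toNat = csn + 1 := by omega
          rw [this, List.getElem?_drop, List.getElem?_take]
        have hQdec : DecidablePred (fun i : Nat => (u.drop start)[i]? = some ' ') := by
          intro i; infer_instance
        set p := Nat.findGreatest (fun i : Nat => (u.drop start)[i]? = some ' ') csn with hpdef
        have hple : p ≤ csn := Nat.findGreatest_le csn
        obtain ⟨hle', hspec, hgreat⟩ :=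
          (Nat.findGreatest_eq_iff).mp (hpdef.symm)
        by_cases hp0 : p = 0
        · -- no space in the window: hard cut at chunk_size
          have hnosp : ∀ q : Nat, 1 ≤ q → q ≤ csn → ¬ ((u.drop start)[q]? = some ' ') := by
            intro q h1 h2
            exact Nat.findGreatest_eq_zero_iff.mp (hp0 ▸ hpdef.symm) (by omega) h2
          have hscan : pvScanA u (start : Int) ((start : Int) + cs)
              ((((start : Int) + cs) - (start : Int)).toNat) = (start : Int) := by
            rw [hfeq, ← hcs2]
            apply pvScan_none
            intro q hq1 hq2
            rw [pvChar u (u.drop start) start hds q (by omega)]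
            intro hsp
            exact hnosp q hq1 hq2 (((hgd q (by omega)).mp hsp))
          have hr : PySem.Chars.rfind (((u.drop start).take (cs + 1).toNat).drop 1) [' ']
              = -1 := by
            show PySem.Chars.rfind.go _ [' '] _ = -1
            rw [hwl]
            apply pvRgo_none
            intro i hi
            rw [Bool.eq_false_iff]
            intro hpre
            have := (pvPrefix_space _ i).mp hpre
            rw [hwget i] at this
            by_cases hlt : 1 + i < csn + 1
            · rw [if_pos hlt] at this
              exact hnosp (1 + i) (by omega) (by omega) this
            · rw [if_neg hlt] at this
              simp at this
          have hsliceA : PySem.List.slice u (some (start : Int)) (some ((start : Int) + cs))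
              = (u.drop start).take csn := by
            rw [← hcs2, show ((start : Int) + (csn : Int)) = ((start + csn : Nat) : Int) from by
              push_cast; ring, PySem.List.slice_natCast,
              show start + csn - start = csn from by omega]
          have hsliceB : PySem.List.slice (u.drop start) (some 0) (some cs)
              = (u.drop start).take csn := by
            rw [show (0 : Int) = ((0 : Nat) : Int) from rfl, ← hcs2, PySem.List.slice_natCast]
            simp
          have hnext : PySem.List.slice (u.drop start) (some (cs + 1)) none
              = u.drop (start + (csn + 1)) := by
            rw [PySem.List.slice_from _ (by omega),
              show (cs + 1).toNat = csn + 1 from by omega, List.drop_drop]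
            try rw [Nat.add_comm]
          have hstep : ((start : Int) + cs) + 1 = ((start + (csn + 1) : Nat) : Int) := by
            push_cast; omega
          rw [if_pos hBc]
          simp only [hmin, hscan, if_pos hA1, ite_true, pvRfindFrom_eq _ cs hcs hBc, hr,
            hsliceA, hsliceB, hnext, hstep]
          exact ih u (start + (csn + 1)) _
        · -- cut at the last space in the window
          have hp1 : 1 ≤ p := by omega
          have hQp : (u.drop start)[p]? = some ' ' := hspec hp0
          have hscan : pvScanA u (start : Int) ((start : Int) + cs)
              ((((start : Int) + cs) - (start : Int)).toNat) = (start : Int) + (p : Int) := by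
            rw [hfeq, ← hcs2]
            apply pvScan_hit u (start : Int) p csn hp1 hple
            · rw [pvChar u (u.drop start) start hds p (by omega)]
              exact (hgd p (by omega)).mpr hQp
            · intro q hq1 hq2
              rw [pvChar u (u.drop start) start hds q (by omega)]
              intro hsp
              exact hgreat hq1 hq2 ((hgd q (by omega)).mp hsp)
          have hr : PySem.Chars.rfind (((u.drop start).take (cs + 1).toNat).drop 1) [' ']
              = ((p - 1 : Nat) : Int) := by
            show PySem.Chars.rfind.go _ [' '] _ = _
            rw [hwl]
            apply pvRgo_hit _ csn (p - 1) (by omega)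
            · rw [pvPrefix_space, hwget (p - 1), if_pos (by omega),
                show 1 + (p - 1) = p from by omega]
              exact hQp
            · intro i hi1 hi2
              rw [Bool.eq_false_iff]
              intro hpre
              have := (pvPrefix_space _ i).mp hpre
              rw [hwget i] at this
              by_cases hlt : 1 + i < csn + 1
              · rw [if_pos hlt] at this
                exact hgreat (by omega) (by omega) this
              · rw [if_neg hlt] at this
                simp at this
          have hps : (1 : Int) + ((p - 1 : Nat) : Int) = ((p : Nat) : Int) := by omega
          have hsliceA : PySem.List.slice u (some (start : Int)) (some ((start : Int) + (p : Int)))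
              = (u.drop start).take p := by
            rw [show ((start : Int) + (p : Int)) = ((start + p : Nat) : Int) from by
              push_cast; ring, PySem.List.slice_natCast,
              show start + p - start = p from by omega]
          have hsliceB : PySem.List.slice (u.drop start) (some 0) (some ((p : Nat) : Int))
              = (u.drop start).take p := by
            rw [show (0 : Int) = ((0 : Nat) : Int) from rfl, PySem.List.slice_natCast]
            simp
          have hnext : PySem.List.slice (u.drop start) (some (((p : Nat) : Int) + 1)) none
              = u.drop (start + (p + 1)) := by
            rw [PySem.List.slice_from _ (by omega),
              show (((p : Nat) : Int) + 1).toNat = p + 1 from by omega, List.drop_drop]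
            try rw [Nat.add_comm]
          have hstep : ((start : Int) + (p : Int)) + 1 = ((start + (p + 1) : Nat) : Int) := by
            push_cast; ring
          rw [if_pos hBc]
          simp only [hmin, hscan, if_pos hA1, pvRfindFrom_eq _ cs hcs hBc, hr,
            if_neg (show ¬ (((p - 1 : Nat) : Int) = -1) from by omega),
            if_neg (show ¬ ((start : Int) + (p : Int) = (start : Int)) from by omega), hps,
            if_neg (show ¬ (((p : Nat) : Int) = -1) from by omega),
            hsliceA, hsliceB, hnext, hstep]
          exact ih u (start + (p + 1)) _

-- ===== VERDICT (by name: the statement is the Claim_ definition above) =====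
theorem clean_and_chunk_text_spec : Claim_equal_clean_and_chunk_text := by
  intro text cs _hdom hcs
  unfold Spec_clean_and_chunk_text clean_and_chunk_text clean_and_chunk_text_alt
  rw [pvCleanA_eq, pvCleanB_eq_words, ← pvWordsB_words]
  have := pvSim cs hcs (text.toList.length + 2) (PySem.Chars.join [' '] (pvWordsB text)) 0 []
  simpa using this
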